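-- pv_equiv track=rewrite | github.com/physical-100/coding_practice | 삼성 기출/2048.py | merge_left
-- ===== SOURCE A (Python) =====
-- def merge_left(p):
--     merged = []
--     i = 0
--
--     while i < len(p):
--         if i < len(p) - 1 and p[i] == p[i + 1]:
--             merged.append(p[i] * 2)
--             i += 2
--         else:
--             merged.append(p[i])
--             i += 1
--
--     return merged
-- ===== SOURCE B (Python) =====
-- def merge_left(p):
--     merged = []
--     open_last = False
--     for x in p:
--         if open_last and merged[-1] == x:
--             merged[-1] *= 2
--             open_last = False
--         else:
--             merged.append(x)
--             open_last = True
--     return merged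
-- ===== Notes on version B (the rewrite author's own statement) =====
-- stated objective: alternative
-- what changed: Replaces the index-jumping while loop that peeks ahead (i += 2 on merge) with a single forward for-loop over the elements that looks backward, maintaining the output list and a merge-availability flag reset after each merge.
import Mathlib
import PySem

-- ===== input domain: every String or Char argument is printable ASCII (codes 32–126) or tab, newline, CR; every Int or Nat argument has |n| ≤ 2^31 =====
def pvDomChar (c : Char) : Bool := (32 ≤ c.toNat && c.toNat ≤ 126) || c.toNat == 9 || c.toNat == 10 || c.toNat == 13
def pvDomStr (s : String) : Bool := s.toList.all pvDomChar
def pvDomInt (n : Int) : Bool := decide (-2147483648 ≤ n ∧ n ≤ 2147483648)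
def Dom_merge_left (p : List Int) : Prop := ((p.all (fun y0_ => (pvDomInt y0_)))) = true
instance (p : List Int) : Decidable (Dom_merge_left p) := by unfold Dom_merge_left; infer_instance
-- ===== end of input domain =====

-- B replaces A's index-jumping look-ahead while loop with a single forward pass
-- keeping a merge-availability flag and looking at the last output element (alternative decomposition).

-- ===== PORT A =====
-- A's while loop: at index i it peeks at p[i+1]; a merge consumes two elements
-- (i += 2), otherwise one (i += 1). Transcribed as structural recursion on the list.
def merge_left (p : List Int) : List Int :=
  match p with
  | [] => []
  | [x] => [x]
  | x :: y :: rest =>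
      if x = y then (x * 2) :: merge_left rest
      else x :: merge_left (y :: rest)

-- ===== PORT B =====
-- B's loop state: the output list `merged` (kept reversed here so that Python's
-- merged[-1] access/update and append are the head operations) and the flag `open_last`.
def mergeStep (s : List Int × Bool) (x : Int) : List Int × Bool :=
  match s with
  | (h :: t, true) => if h = x then ((h * 2) :: t, false) else (x :: h :: t, true)
  | (acc, _) => (x :: acc, true)

def merge_left_alt (p : List Int) : List Int :=
  (p.foldl mergeStep ([], false)).1.reverse

-- ===== PRECONDITION & SPEC =====
def Spec_merge_left (p : List Int) (out : List Int) : Prop := out = merge_left_alt p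
instance (p : List Int) (out : List Int) : Decidable (Spec_merge_left p out) := by unfold Spec_merge_left; infer_instance

-- ===== CLAIM (what is proved, stated in full; the proofs are below) =====
def Claim_equal_merge_left : Prop := ∀ (p : List Int), Dom_merge_left p → Spec_merge_left p (merge_left p)

-- ===== LEMMAS AND PROOFS =====
theorem mergeStep_key : ∀ (p acc : List Int),
    (List.foldl mergeStep (acc, false) p).1 = (merge_left p).reverse ++ acc
  | [], _ => by simp [merge_left]
  | [x], acc => by simp [merge_left, List.foldl, mergeStep]
  | x :: y :: rest, acc => by
      by_cases h : x = y
      · subst h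
        have ih := mergeStep_key rest ((x * 2) :: acc)
        simp [List.foldl, mergeStep, merge_left, ih]
      · have ih := mergeStep_key (y :: rest) (x :: acc)
        simpa [List.foldl, mergeStep, h, merge_left] using ih
  termination_by p => p.length

-- ===== VERDICT (by name: the statement is the Claim_ definition above) =====
theorem merge_left_spec : Claim_equal_merge_left := by
  intro p _
  unfold Spec_merge_left merge_left_alt
  simp [mergeStep_key p []]
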